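-- pv_equiv track=rewrite | github.com/LuffyKarthus/Testing | Testing.py | parse_games
-- ===== SOURCE A (Python) =====
-- def parse_games(game_day, game_time_list, game_team_list, game_odds_list,game_url_list):
--     """Parse all the lists into a list with each tuple storing the game information"""
--     game_list = [] # for storing all games
--
--     def split_list(alist):
--         """Split a list into two lists with odd/even indices"""
--         return alist[0:][::2], alist[1:][::2]
--
--     home_team_list, away_team_list = split_list(game_team_list)
--     home_odds_list, away_odds_list = split_list(game_odds_list)
--
--     for time, home_team, away_team, home_odds, away_odds,url in zip(game_time_list, home_team_list, away_team_list,home_odds_list, away_odds_list,game_url_list):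
--
--         record = (game_day, time, home_team, away_team, home_odds, away_odds,url)
--         game_list.append(record)
--     return game_list
-- ===== SOURCE B (Python) =====
-- def parse_games(game_day, game_time_list, game_team_list, game_odds_list, game_url_list):
--     """Parse all the lists into a list with each tuple storing the game information"""
--     n = min(len(game_time_list), len(game_team_list) // 2,
--             len(game_odds_list) // 2, len(game_url_list))
--     game_list = []
--     for i in range(n):
--         game_list.append((game_day,
--                           game_time_list[i],
--                           game_team_list[2 * i],
--                           game_team_list[2 * i + 1],
--                           game_odds_list[2 * i],
--                           game_odds_list[2 * i + 1],
--                           game_url_list[i]))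
--     return game_list
-- ===== Notes on version B (the rewrite author's own statement) =====
-- stated objective: simpler
-- what changed: Drops split_list and the even/odd intermediate sublists and the 6-way zip; computes the record count n = min(len(times), len(teams)//2, len(odds)//2, len(urls)) once and builds each record by direct index arithmetic over the original lists.
import Mathlib
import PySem

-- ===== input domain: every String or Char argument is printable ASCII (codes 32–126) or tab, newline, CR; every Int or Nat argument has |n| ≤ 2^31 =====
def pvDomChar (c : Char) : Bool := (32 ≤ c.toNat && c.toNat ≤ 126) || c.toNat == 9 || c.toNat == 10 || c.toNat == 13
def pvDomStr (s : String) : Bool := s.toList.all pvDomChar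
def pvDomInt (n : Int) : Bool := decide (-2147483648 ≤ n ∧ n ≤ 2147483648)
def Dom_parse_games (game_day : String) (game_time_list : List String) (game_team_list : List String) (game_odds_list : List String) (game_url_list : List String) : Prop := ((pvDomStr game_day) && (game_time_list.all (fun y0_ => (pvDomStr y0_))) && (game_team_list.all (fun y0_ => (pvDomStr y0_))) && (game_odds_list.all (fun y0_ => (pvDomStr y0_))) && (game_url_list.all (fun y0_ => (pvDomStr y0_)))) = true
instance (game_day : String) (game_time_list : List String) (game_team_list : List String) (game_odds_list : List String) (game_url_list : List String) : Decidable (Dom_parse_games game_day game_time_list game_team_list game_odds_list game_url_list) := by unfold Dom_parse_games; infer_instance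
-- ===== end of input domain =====

-- B drops split_list, the even/odd intermediate sublists and the 6-way zip, building each
-- record by direct index arithmetic over the original lists (objective: simpler).

-- ===== PORT A =====
-- split_list: return alist[0:][::2], alist[1:][::2]  (step-2 slices; step ≠ 0 so slice? never returns none, .getD [] is unreachable)
def pvSplitList (alist : List String) : List String × List String :=
  ((PySem.List.slice? (PySem.List.slice alist (some 0) none) none none 2).getD [],
   (PySem.List.slice? (PySem.List.slice alist (some 1) none) none none 2).getD [])

def parse_games (game_day : String) (game_time_list : List String) (game_team_list : List String) (game_odds_list : List String) (game_url_list : List String) : List (String × String × String × String × String × String × String) :=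
  let ht := pvSplitList game_team_list
  let ho := pvSplitList game_odds_list
  (game_time_list.zip (ht.1.zip (ht.2.zip (ho.1.zip (ho.2.zip game_url_list))))).foldl
    (fun game_list x =>
      match x with
      | (time, home_team, away_team, home_odds, away_odds, url) =>
        game_list ++ [(game_day, time, home_team, away_team, home_odds, away_odds, url)]) []

-- ===== PORT B =====
def parse_games_alt (game_day : String) (game_time_list : List String) (game_team_list : List String) (game_odds_list : List String) (game_url_list : List String) : List (String × String × String × String × String × String × String) :=
  let n : Nat := min (min (min game_time_list.length (game_team_list.length / 2)) (game_odds_list.length / 2)) game_url_list.length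
  (PySem.List.pyRange 0 (n : Int) 1).foldl
    (fun game_list i =>
      game_list ++ [(game_day,
        PySem.List.pyGetD game_time_list i "",
        PySem.List.pyGetD game_team_list (2 * i) "",
        PySem.List.pyGetD game_team_list (2 * i + 1) "",
        PySem.List.pyGetD game_odds_list (2 * i) "",
        PySem.List.pyGetD game_odds_list (2 * i + 1) "",
        PySem.List.pyGetD game_url_list i "")]) []

-- ===== PRECONDITION & SPEC =====
def Spec_parse_games (game_day : String) (game_time_list : List String) (game_team_list : List String) (game_odds_list : List String) (game_url_list : List String) (out : List (String × String × String × String × String × String × String)) : Prop := out = parse_games_alt game_day game_time_list game_team_list game_odds_list game_url_list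
instance (game_day : String) (game_time_list : List String) (game_team_list : List String) (game_odds_list : List String) (game_url_list : List String) (out : List (String × String × String × String × String × String × String)) : Decidable (Spec_parse_games game_day game_time_list game_team_list game_odds_list game_url_list out) := by
  unfold Spec_parse_games
  haveI : DecidableEq (String × String × String × String × String × String × String) := fun x y => instDecidableEqProd x y
  infer_instance

-- ===== CLAIM (what is proved, stated in full; the proofs are below) =====
def Claim_equal_parse_games : Prop := ∀ (game_day : String) (game_time_list : List String) (game_team_list : List String) (game_odds_list : List String) (game_url_list : List String), Dom_parse_games game_day game_time_list game_team_list game_odds_list game_url_list → Spec_parse_games game_day game_time_list game_team_list game_odds_list game_url_list (parse_games game_day game_time_list game_team_list game_odds_list game_url_list)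

-- ===== LEMMAS AND PROOFS =====

-- a step-2 slice over the whole list picks the even-index elements
theorem slice?_step_two (xs : List String) :
    PySem.List.slice? xs none none 2
      = some ((List.range ((xs.length + 1) / 2)).map (fun k => xs.getD (2 * k) "")) := by
  simp only [PySem.List.slice?, PySem.List.sliceIndices]
  norm_num
  have hc : (if 0 < xs.length then (((xs.length : Int) + 2 - 1) / 2).toNat else 0)
      = (xs.length + 1) / 2 := by split <;> omega
  rw [hc, ← List.filterMap_eq_map]
  apply List.filterMap_congr
  intro x hx
  simp only [List.mem_range] at hx
  have h2 : (2 * (x : Int)).toNat = 2 * x := by omega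
  have hlt : 2 * x < xs.length := by omega
  simp [h2, List.getElem?_eq_getElem hlt]

theorem splitList_fst (xs : List String) :
    (pvSplitList xs).1 = (List.range ((xs.length + 1) / 2)).map (fun k => xs.getD (2 * k) "") := by
  simp [pvSplitList, slice?_step_two]

theorem splitList_snd (xs : List String) :
    (pvSplitList xs).2 = (List.range (xs.length / 2)).map (fun k => xs.getD (2 * k + 1) "") := by
  have h1 : PySem.List.slice xs (some 1) none = xs.tail := PySem.List.slice_from_one xs
  simp only [pvSplitList, h1, slice?_step_two, Option.getD_some]
  have hl : (xs.tail.length + 1) / 2 = xs.length / 2 := by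
    rcases xs with _ | ⟨a, t⟩ <;> simp
  rw [hl]
  apply List.map_congr_left
  intro k _
  rcases xs with _ | ⟨a, t⟩ <;> simp [List.getD]

-- ===== VERDICT (by name: the statement is the Claim_ definition above) =====
theorem parse_games_spec : Claim_equal_parse_games := by
  unfold Claim_equal_parse_games
  intro day times teams odds urls _
  unfold Spec_parse_games parse_games parse_games_alt
  simp only [PySem.List.foldl_append_singleton_eq_map, PySem.List.pyRange_zero_natCast,
      List.map_map, splitList_fst, splitList_snd, List.nil_append]
  apply List.ext_getElem
  · simp; omega
  · intro i h1 h2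
    simp only [List.getElem_map, List.getElem_zip, List.getElem_range, Function.comp_apply]
    simp only [List.length_map, List.length_zip, List.length_range] at h1 h2
    have hti : i < times.length := by omega
    have hui : i < urls.length := by omega
    have h2i : 2 * i < teams.length := by omega
    have h2i1 : 2 * i + 1 < teams.length := by omega
    have h2o : 2 * i < odds.length := by omega
    have h2o1 : 2 * i + 1 < odds.length := by omega
    simp [PySem.List.pyGetD_natCast, List.getD_eq_getElem?_getD,
      hti, hui, h2i, h2i1, h2o, h2o1]
    ring_nf
    have e1 : ((i : Int) * 2) = ((i * 2 : Nat) : Int) := by push_cast; ring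
    have e2 : ((1 : Int) + ((i * 2 : Nat) : Int)) = ((1 + i * 2 : Nat) : Int) := by push_cast; ring
    have g1 : i * 2 < teams.length := by omega
    have g2 : 1 + i * 2 < teams.length := by omega
    have g3 : i * 2 < odds.length := by omega
    have g4 : 1 + i * 2 < odds.length := by omega
    rw [e1, e2]
    simp only [PySem.List.pyGetD_natCast]
    simp [List.getD_eq_getElem?_getD, g1, g2, g3, g4]
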